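-- pv_equiv track=rewrite | github.com/Virgilio-AI/Automation_Suite_Scheduler | Scheduler.py | splitStringByString
-- ===== SOURCE A (Python) =====
-- def splitStringByString(strin,delimeter):
-- 	resultArray=[]
-- 	counter=0
-- 	tempStrin=''
-- 	for element in range(0, len(strin)):
-- 		if strin[element] == delimeter:
-- 			resultArray.append(tempStrin)
-- 			tempStrin=""
-- 		else:
-- 			tempStrin+=strin[element]
-- 	return resultArray
-- ===== SOURCE B (Python) =====
-- def splitStringByString(strin, delimeter):
--     # find-next-delimiter-then-slice: repeatedly cut off the segment before
--     # the first matching character; the tail after the last match is dropped.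
--     segments = []
--     rest = strin
--     while True:
--         idx = None
--         for k, c in enumerate(rest):
--             if c == delimeter:
--                 idx = k
--                 break
--         if idx is None:
--             return segments
--         segments.append(rest[:idx])
--         rest = rest[idx + 1:]
-- ===== Notes on version B (the rewrite author's own statement) =====
-- stated objective: faster
-- what changed: Replaces A's single char-by-char pass that grows the current segment by repeated string concatenation with a find-next-delimiter-then-slice loop: locate the first matching character, emit the slice before it, and continue on the remainder (the tail after the last match is naturally dropped).
import Mathlib
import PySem

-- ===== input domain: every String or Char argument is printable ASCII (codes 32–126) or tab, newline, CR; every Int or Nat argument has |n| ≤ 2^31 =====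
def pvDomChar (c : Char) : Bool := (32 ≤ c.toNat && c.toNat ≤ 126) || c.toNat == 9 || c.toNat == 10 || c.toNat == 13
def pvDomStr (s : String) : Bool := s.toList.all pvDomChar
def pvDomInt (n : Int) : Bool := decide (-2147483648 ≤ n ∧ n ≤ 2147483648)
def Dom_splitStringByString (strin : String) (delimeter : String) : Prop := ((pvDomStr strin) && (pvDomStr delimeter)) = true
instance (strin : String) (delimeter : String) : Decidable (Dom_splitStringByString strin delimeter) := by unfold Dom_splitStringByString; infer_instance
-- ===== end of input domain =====

-- B replaces A's char-by-char accumulating pass with a find-next-delimiter-then-slice loop; same return value everywhere.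

-- ===== PORT A =====
-- A: one pass over the characters, growing a temp segment, emitting it on each delimiter match
-- (strin[element] is a 1-char string, compared with the whole delimeter string).
def splitStringByString (strin : String) (delimeter : String) : List String :=
  (strin.toList.foldl
    (fun (st : List String × List Char) c =>
      if String.mk [c] == delimeter then (st.1 ++ [String.mk st.2], [])
      else (st.1, st.2 ++ [c]))
    ([], [])).1

-- ===== PORT B =====
-- B: repeatedly find the first character equal to the delimiter, emit the slice before it,
-- continue on the remainder; the tail after the last match is dropped.
def altGo (delimeter : String) (cs : List Char) : List String :=
  match h : cs.findIdx? (fun c => String.mk [c] == delimeter) with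
  | none => []
  | some i => String.mk (cs.take i) :: altGo delimeter (cs.drop (i + 1))
termination_by cs.length
decreasing_by
  have hi : i < cs.length := by
    rcases List.findIdx?_eq_some_iff_getElem.mp h with ⟨hlt, _⟩
    exact hlt
  simp [List.length_drop]; omega

def splitStringByString_alt (strin : String) (delimeter : String) : List String :=
  altGo delimeter strin.toList

-- ===== PRECONDITION & SPEC =====
def Spec_splitStringByString (strin : String) (delimeter : String) (out : List String) : Prop := out = splitStringByString_alt strin delimeter
instance (strin : String) (delimeter : String) (out : List String) : Decidable (Spec_splitStringByString strin delimeter out) := by unfold Spec_splitStringByString; infer_instance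

-- ===== CLAIM (what is proved, stated in full; the proofs are below) =====
def Claim_equal_splitStringByString : Prop := ∀ (strin : String) (delimeter : String), Dom_splitStringByString strin delimeter → Spec_splitStringByString strin delimeter (splitStringByString strin delimeter)

-- ===== LEMMAS AND PROOFS =====

-- proof-only reference recursion: first segment seeded with `temp`
def segRec (delimeter : String) (temp : List Char) : List Char → List String
  | [] => []
  | c :: cs =>
    if String.mk [c] == delimeter then String.mk temp :: segRec delimeter [] cs
    else segRec delimeter (temp ++ [c]) cs

theorem foldA_eq_segRec (delimeter : String) (cs : List Char) :
    ∀ (res : List String) (temp : List Char),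
    (cs.foldl
      (fun (st : List String × List Char) c =>
        if String.mk [c] == delimeter then (st.1 ++ [String.mk st.2], [])
        else (st.1, st.2 ++ [c]))
      (res, temp)).1 = res ++ segRec delimeter temp cs := by
  induction cs with
  | nil => intro res temp; simp [segRec]
  | cons c cs ih =>
    intro res temp
    rw [List.foldl_cons]
    by_cases hc : String.mk [c] = delimeter
    · rw [if_pos (beq_iff_eq.mpr hc), ih]
      simp [segRec, hc]
    · rw [if_neg (fun hb => hc (beq_iff_eq.mp hb)), ih]
      simp [segRec, hc]

theorem segRec_no_delim (delimeter : String) (cs : List Char)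
    (h : ∀ c ∈ cs, ¬ (String.mk [c] == delimeter) = true) :
    ∀ temp, segRec delimeter temp cs = [] := by
  induction cs with
  | nil => intro temp; simp [segRec]
  | cons c cs ih =>
    intro temp
    have hc := h c (List.mem_cons_self ..)
    simp only [segRec, if_neg hc]
    exact ih (fun c hm => h c (List.mem_cons_of_mem _ hm)) _

theorem segRec_split (delimeter : String) (pre : List Char) (d : Char) (rest : List Char)
    (hpre : ∀ c ∈ pre, ¬ (String.mk [c] == delimeter) = true)
    (hd : (String.mk [d] == delimeter) = true) :
    ∀ temp, segRec delimeter temp (pre ++ d :: rest) =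
      String.mk (temp ++ pre) :: segRec delimeter [] rest := by
  induction pre with
  | nil => intro temp; simp [segRec, hd]
  | cons c pre ih =>
    intro temp
    have hc := hpre c (List.mem_cons_self ..)
    simp only [List.cons_append, segRec, if_neg hc]
    rw [ih (fun c hm => hpre c (List.mem_cons_of_mem _ hm))]
    simp

theorem altGo_eq_segRec_aux (delimeter : String) :
    ∀ (n : Nat) (cs : List Char), cs.length ≤ n →
      altGo delimeter cs = segRec delimeter [] cs := by
  intro n
  induction n with
  | zero =>
    intro cs hl
    have : cs = [] := List.length_eq_zero_iff.mp (by omega)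
    subst this
    simp [altGo, segRec]
  | succ n ih =>
    intro cs hl
    rw [altGo.eq_def]
    split
    · next h =>
      have hnone := List.findIdx?_eq_none_iff.mp h
      exact (segRec_no_delim delimeter cs (by simpa using hnone) []).symm
    · next i h =>
      rcases List.findIdx?_eq_some_iff_getElem.mp h with ⟨hlt, hget, hbefore⟩
      have hdecomp : cs = cs.take i ++ cs[i] :: cs.drop (i + 1) := by
        rw [List.getElem_cons_drop hlt, List.take_append_drop]
      have hpre : ∀ c ∈ cs.take i, ¬ (String.mk [c] == delimeter) = true := by
        intro c hm
        rcases List.mem_take_iff_getElem.mp hm with ⟨j, hj, rfl⟩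
        exact by simpa using hbefore j (by omega)
      have hlen : (cs.drop (i + 1)).length ≤ n := by
        simp [List.length_drop]; omega
      rw [ih _ hlen]
      conv_rhs => rw [hdecomp]
      rw [segRec_split delimeter _ _ _ hpre hget]
      simp

theorem altGo_eq_segRec (delimeter : String) (cs : List Char) :
    altGo delimeter cs = segRec delimeter [] cs :=
  altGo_eq_segRec_aux delimeter cs.length cs (le_refl _)

-- ===== VERDICT (by name: the statement is the Claim_ definition above) =====
theorem splitStringByString_spec : Claim_equal_splitStringByString := by
  intro strin delimeter _
  unfold Spec_splitStringByString splitStringByString splitStringByString_alt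
  rw [foldA_eq_segRec, altGo_eq_segRec]
  simp
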